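-- pv_equiv track=rewrite | github.com/Hyes-y/algorithm | programmers/숫자게임.py | solution
-- ===== SOURCE A (Python) =====
-- def solution(A, B):
--     answer = 0
--     A.sort(reverse=True)
--     B.sort(reverse=True)
--
--     for a in A:
--         idx = 0
--         win = False
--         for i, b in enumerate(B):
--             if a >= b:  # A와 같은 걸 굳이 낼 필요 없음
--                 break
--             else:
--                 win = True
--                 idx = i
--         if win:
--             answer += 1
--             del B[idx]
--
--     return answer
-- ===== SOURCE B (Python) =====
-- def solution(A, B):
--     # Return-value equivalent to A (A also sorts its arguments in place and
--     # empties matched items from B; B here does not mutate its arguments).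
--     a_sorted = sorted(A)
--     ans = 0
--     for b in sorted(B):
--         if ans < len(a_sorted) and b > a_sorted[ans]:
--             ans += 1
--     return ans
-- ===== Notes on version B (the rewrite author's own statement) =====
-- stated objective: faster
-- what changed: Replaced A's quadratic greedy (rescan the descending B from the front for each a and delete the chosen element) by sorting both lists ascending and counting matches with a single two-pointer pass.
import Mathlib
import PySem

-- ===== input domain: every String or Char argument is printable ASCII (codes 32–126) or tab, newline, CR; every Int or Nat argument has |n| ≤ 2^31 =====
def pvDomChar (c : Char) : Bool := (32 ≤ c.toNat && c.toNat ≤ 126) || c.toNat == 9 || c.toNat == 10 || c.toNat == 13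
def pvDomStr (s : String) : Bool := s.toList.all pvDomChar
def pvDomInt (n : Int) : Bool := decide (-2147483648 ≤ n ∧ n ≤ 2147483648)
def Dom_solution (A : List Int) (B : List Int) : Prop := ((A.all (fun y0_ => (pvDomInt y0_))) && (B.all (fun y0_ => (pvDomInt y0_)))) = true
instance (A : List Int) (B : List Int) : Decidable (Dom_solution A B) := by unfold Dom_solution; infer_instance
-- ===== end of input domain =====

-- B replaces A's quadratic rescan-and-delete greedy by a single ascending two-pointer
-- pass after sorting (equivalence is about the RETURN value: Python A also sorts its
-- arguments in place and deletes matched elements from B; Python B does not mutate).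

-- ===== PORT A =====
-- inner loop: 'for i, b in enumerate(B): if a >= b: break; else: win = True; idx = i'
def pvScan (a : Int) : List Int → Nat → Bool → Nat → Bool × Nat
  | [], _, win, idx => (win, idx)
  | b :: rest, i, win, idx =>
    if a ≥ b then (win, idx) else pvScan a rest (i + 1) true i

-- one outer iteration; 'del B[idx]' is eraseIdx (exact: when win holds, idx is an
-- enumerate index of the current B, hence in range)
def pvStep (st : Int × List Int) (a : Int) : Int × List Int :=
  let s := pvScan a st.2 0 false 0
  if s.1 then (st.1 + 1, st.2.eraseIdx s.2) else st

def solution (A : List Int) (B : List Int) : Int :=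
  let A' := PySem.List.sorted A (fun x => x) true
  let B' := PySem.List.sorted B (fun x => x) true
  (A'.foldl pvStep (0, B')).1

-- ===== PORT B =====
-- 'if ans < len(a_sorted) and b > a_sorted[ans]' — under the guard 0 ≤ ans < len,
-- pyGetD is exactly Python's a_sorted[ans]
def pvMatch (asrt : List Int) (ans : Int) (b : Int) : Int :=
  if ans < (asrt.length : Int) ∧ PySem.List.pyGetD asrt ans 0 < b then ans + 1 else ans

def solution_alt (A : List Int) (B : List Int) : Int :=
  let asrt := PySem.List.sorted A (fun x => x) false
  (PySem.List.sorted B (fun x => x) false).foldl (pvMatch asrt) 0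

-- ===== PRECONDITION & SPEC =====
def Spec_solution (A : List Int) (B : List Int) (out : Int) : Prop := out = solution_alt A B
instance (A : List Int) (B : List Int) (out : Int) : Decidable (Spec_solution A B out) := by unfold Spec_solution; infer_instance

-- ===== CLAIM (what is proved, stated in full; the proofs are below) =====
def Claim_equal_solution : Prop := ∀ (A : List Int) (B : List Int), Dom_solution A B → Spec_solution A B (solution A B)

-- ===== LEMMAS AND PROOFS =====

/-- Abstract ascending two-pointer count: both lists sorted ascending. -/
def pvG : List Int → List Int → Nat
  | _, [] => 0
  | [], _ :: bs => pvG [] bs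
  | a :: as, b :: bs => if a < b then pvG as bs + 1 else pvG (a :: as) bs
  termination_by _ bs => bs.length

theorem pvG_cons_cons (a b : Int) (as bs : List Int) :
    pvG (a :: as) (b :: bs) = if a < b then pvG as bs + 1 else pvG (a :: as) bs := by
  simp [pvG]

theorem pvG_nil (bs : List Int) : pvG [] bs = 0 := by
  induction bs with
  | nil => simp [pvG]
  | cons b bs ih => simp [pvG, ih]

/-- B-side bridge: the fold with an Int pointer computes pvG on the dropped list. -/
theorem pvMatch_foldl (asrt : List Int) (bs : List Int) (n : Nat) :
    bs.foldl (pvMatch asrt) (n : Int) = (n : Int) + pvG (asrt.drop n) bs := by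
  induction bs generalizing n with
  | nil => simp [pvG]
  | cons b bs ih =>
    by_cases hn : n < asrt.length
    · have hdrop : asrt.drop n = asrt[n] :: asrt.drop (n + 1) :=
        List.drop_eq_getElem_cons hn
      have hget : PySem.List.pyGetD asrt (n : Int) 0 = asrt[n] := by
        simp [List.getD_eq_getElem?_getD, List.getElem?_eq_getElem hn]
      by_cases hb : asrt[n] < b
      · have hm : pvMatch asrt (n : Int) b = ((n + 1 : Nat) : Int) := by
          simp [pvMatch, hget, hn, hb]
        rw [List.foldl_cons, hm, ih, hdrop, pvG_cons_cons, if_pos hb]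
        push_cast; ring
      · have hm : pvMatch asrt (n : Int) b = (n : Int) := by
          simp [pvMatch, hget]; intro _; omega
        rw [List.foldl_cons, hm, ih, hdrop, pvG_cons_cons, if_neg hb, ← hdrop]
    · have hd : asrt.drop n = [] := List.drop_eq_nil_of_le (by omega)
      have : pvMatch asrt (n : Int) b = (n : Int) := by
        simp [pvMatch]; intro h; omega
      rw [List.foldl_cons, this, ih]
      simp [hd, pvG_nil]

/-- Appending a maximal element to the a-side changes nothing if no b beats it. -/
theorem pvG_append_max (bs : List Int) (as : List Int) (a : Int)
    (h : ∀ b ∈ bs, b ≤ a) : pvG (as ++ [a]) bs = pvG as bs := by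
  induction bs generalizing as with
  | nil => simp [pvG]
  | cons b bs ih =>
    have hba : b ≤ a := h b (by simp)
    cases as with
    | nil =>
      simp only [List.nil_append, pvG_nil]
      have : ¬ a < b := by omega
      simp [pvG, this]
      simpa [pvG_nil] using ih [] (fun x hx => h x (by simp [hx]))
    | cons a0 as' =>
      by_cases hb : a0 < b
      · simp only [List.cons_append, pvG, if_pos hb]
        rw [ih as' (fun x hx => h x (by simp [hx]))]
      · simp only [List.cons_append, pvG, if_neg hb]
        rw [show a0 :: (as' ++ [a]) = (a0 :: as') ++ [a] by simp,
          ih (a0 :: as') (fun x hx => h x (by simp [hx]))]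

/-- If every element of P beats every element of as, the suffix P saturates the count. -/
theorem pvG_append_big (S : List Int) (as P : List Int)
    (h : ∀ b ∈ P, ∀ x ∈ as, x < b) :
    pvG as (S ++ P) = min as.length (pvG as S + P.length) := by
  induction S generalizing as with
  | nil =>
    simp only [List.nil_append, pvG]
    induction P generalizing as with
    | nil => simp [pvG]
    | cons p P ihp =>
      cases as with
      | nil => simp [pvG_nil]
      | cons a as' =>
        have hpa : a < p := h p (by simp) a (by simp)
        simp only [pvG, if_pos hpa]
        rw [ihp as' (fun b hb x hx => h b (by simp [hb]) x (by simp [hx]))]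
        simp [Nat.succ_min_succ]
  | cons s S ihS =>
    cases as with
    | nil => simp [pvG_nil]
    | cons a as' =>
      by_cases hs : a < s
      · simp only [List.cons_append, pvG, if_pos hs]
        rw [ihS as' (fun b hb x hx => h b hb x (by simp [hx]))]
        simp
        omega
      · simp only [List.cons_append, pvG, if_neg hs]
        exact ihS (a :: as') h

/-- The inner scan on (all-beating prefix) ++ (stopper suffix). -/
theorem pvScan_split (a : Int) (xs ys : List Int)
    (hx : ∀ x ∈ xs, a < x) (hy : ∀ h : ys ≠ [], a ≥ ys.head h) :
    ∀ i win idx, pvScan a (xs ++ ys) i win idx =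
      if xs = [] then (win, idx) else (true, i + xs.length - 1) := by
  induction xs generalizing ys with
  | nil =>
    intro i win idx
    cases ys with
    | nil => simp [pvScan]
    | cons y ys' =>
      have : a ≥ y := hy (by simp)
      simp [pvScan, this]
  | cons x xs' ih =>
    intro i win idx
    have hax : a < x := hx x (by simp)
    have : ¬ a ≥ x := by omega
    simp only [List.cons_append, pvScan, if_neg this]
    rw [ih ys (fun z hz => hx z (by simp [hz])) hy]
    by_cases hxe : xs' = []
    · simp [hxe]
    · simp only [if_neg hxe]
      simp

theorem sorted_rev_eq_reverse (xs : List Int) :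
    PySem.List.sorted xs (fun x => x) true = (PySem.List.sorted xs (fun x => x) false).reverse := by
  refine List.Perm.eq_of_pairwise (le := fun a b : Int => b ≤ a)
    (fun _ _ _ _ h1 h2 => le_antisymm h2 h1) ?_ ?_ ?_
  · exact PySem.List.sorted_pairwise_rev xs (fun x => x)
  · exact List.pairwise_reverse.mpr (by simpa using PySem.List.sorted_pairwise xs (fun x => x))
  · exact (PySem.List.sorted_perm xs (fun x => x) true).trans
      ((PySem.List.sorted_perm xs (fun x => x) false).symm.trans (List.reverse_perm _).symm)

theorem eraseIdx_append_cons {α : Type} (l : List α) (x : α) (r : List α) :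
    (l ++ x :: r).eraseIdx l.length = l ++ r := by
  induction l with
  | nil => simp
  | cons y l ih => simp [ih]

/-- One outer step of A on the reverse of an ascending-sorted list. -/
theorem pvStep_eq (a : Int) (c : Int) (bs : List Int) (hbs : bs.Pairwise (· ≤ ·)) :
    pvStep (c, bs.reverse) a =
      if bs.dropWhile (fun b => decide (b ≤ a)) = [] then (c, bs.reverse)
      else (c + 1,
        ((bs.takeWhile (fun b => decide (b ≤ a))) ++
          (bs.dropWhile (fun b => decide (b ≤ a))).tail).reverse) := by
  set p : Int → Bool := fun b => decide (b ≤ a) with hp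
  have hsplit : bs = bs.takeWhile p ++ bs.dropWhile p := (List.takeWhile_append_dropWhile).symm
  have hPgt : ∀ x ∈ bs.dropWhile p, a < x := by
    intro x hx
    have hpw : (bs.dropWhile p).Pairwise (· ≤ ·) := hbs.sublist (List.dropWhile_sublist p)
    cases hD : bs.dropWhile p with
    | nil => rw [hD] at hx; simp at hx
    | cons d t =>
      have hd : ¬ (d ≤ a) := by
        have := List.head?_dropWhile_not p bs
        rw [hD] at this; simpa [hp] using this
      rw [hD] at hx hpw
      rcases List.mem_cons.mp hx with rfl | hxt
      · omega
      · have : d ≤ x := (List.pairwise_cons.mp hpw).1 x hxt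
        omega
  have hSle : ∀ x ∈ bs.takeWhile p, x ≤ a := by
    intro x hx
    have := List.mem_takeWhile_imp hx
    simpa [hp] using this
  have hrev : bs.reverse = (bs.dropWhile p).reverse ++ (bs.takeWhile p).reverse := by
    conv_lhs => rw [hsplit]
    simp
  have hscan := pvScan_split a ((bs.dropWhile p).reverse) ((bs.takeWhile p).reverse)
    (fun x hx => hPgt x (by simpa using hx))
    (fun h => by
      have hmem : ((bs.takeWhile p).reverse.head h) ∈ bs.takeWhile p := by
        have := List.head_mem h
        rwa [List.mem_reverse] at this
      have := hSle _ hmem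
      omega) 0 false 0
  cases hD : bs.dropWhile p with
  | nil =>
    rw [hD] at hscan
    simp only [pvStep, hrev, hD, List.reverse_nil]
    simp at hscan
    simp [hscan]
  | cons d t =>
    rw [hD] at hscan
    have hne : (d :: t).reverse ≠ [] := by simp
    simp only [pvStep, hrev, hD]
    rw [hscan]
    simp only [if_neg hne, List.length_reverse, List.length_cons]
    have hidx : 0 + (t.length + 1) - 1 = t.length := by omega
    have herase : (d :: t).reverse ++ (bs.takeWhile p).reverse =
        t.reverse ++ d :: (bs.takeWhile p).reverse := by simp
    simp only [hidx]
    rw [herase, show t.length = t.reverse.length by simp, eraseIdx_append_cons]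
    simp

/-- Main invariant: A's fold over the descending lists computes pvG of the ascending ones. -/
theorem pvFold_eq (as : List Int) (has : as.Pairwise (· ≤ ·)) :
    ∀ bs : List Int, bs.Pairwise (· ≤ ·) → ∀ c : Int,
      (as.reverse.foldl pvStep (c, bs.reverse)).1 = c + (pvG as bs : Int) := by
  induction as using List.reverseRecOn with
  | nil => intro bs _ c; simp [pvG_nil]
  | append_singleton as' a ih =>
    intro bs hbs c
    have has' : as'.Pairwise (· ≤ ·) := (List.pairwise_append.mp has).1
    have hle : ∀ x ∈ as', x ≤ a := fun x hx =>
      (List.pairwise_append.mp has).2.2 x hx a (by simp)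
    set p : Int → Bool := fun b => decide (b ≤ a) with hp
    have hsplit : bs = bs.takeWhile p ++ bs.dropWhile p := (List.takeWhile_append_dropWhile).symm
    have hSle : ∀ x ∈ bs.takeWhile p, x ≤ a := fun x hx => by
      simpa [hp] using List.mem_takeWhile_imp hx
    have hPgt : ∀ x ∈ bs.dropWhile p, a < x := by
      intro x hx
      have hpw : (bs.dropWhile p).Pairwise (· ≤ ·) := hbs.sublist (List.dropWhile_sublist p)
      cases hD : bs.dropWhile p with
      | nil => rw [hD] at hx; simp at hx
      | cons d t =>
        have hd : ¬ (d ≤ a) := by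
          have := List.head?_dropWhile_not p bs
          rw [hD] at this; simpa [hp] using this
        rw [hD] at hx hpw
        rcases List.mem_cons.mp hx with rfl | hxt
        · omega
        · have : d ≤ x := (List.pairwise_cons.mp hpw).1 x hxt
          omega
    rw [List.reverse_append, List.reverse_singleton, List.singleton_append, List.foldl_cons]
    have hstep := pvStep_eq a c bs hbs
    cases hD : bs.dropWhile p with
    | nil =>
      rw [hD, if_pos rfl] at hstep
      rw [hstep, ih has' bs hbs c]
      have hall : ∀ b ∈ bs, b ≤ a := by
        intro b hb
        have : b ∈ bs.takeWhile p := by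
          rw [hsplit] at hb; rw [hD] at hb; simpa using hb
        exact hSle b this
      rw [pvG_append_max bs as' a hall]
    | cons d t =>
      rw [hD, if_neg (by simp : ¬ (d :: t) = [])] at hstep
      rw [hstep]
      simp only [List.tail_cons, ← hp]
      have htpw : (bs.takeWhile p ++ t).Pairwise (· ≤ ·) := by
        have hsub : (bs.takeWhile p ++ t).Sublist (bs.takeWhile p ++ d :: t) :=
          (List.sublist_cons_self d t).append_left _
        have hw : (bs.takeWhile p ++ d :: t).Pairwise (· ≤ ·) := by
          rw [← hD, ← hsplit]; exact hbs
        exact hw.sublist hsub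
      rw [ih has' (bs.takeWhile p ++ t) htpw (c + 1)]
      have h1 : pvG (as' ++ [a]) bs =
          min (as'.length + 1) (pvG (as' ++ [a]) (bs.takeWhile p) + (t.length + 1)) := by
        conv_lhs => rw [hsplit, hD]
        have := pvG_append_big (bs.takeWhile p) (as' ++ [a]) (d :: t)
          (fun b hb x hx => by
            have hbgt : a < b := hPgt b (by rw [hD]; exact hb)
            rcases List.mem_append.mp hx with hx' | hx'
            · have := hle x hx'; omega
            · simp at hx'; omega)
        simpa using this
      have h2 : pvG as' (bs.takeWhile p ++ t) =
          min as'.length (pvG as' (bs.takeWhile p) + t.length) :=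
        pvG_append_big (bs.takeWhile p) as' t
          (fun b hb x hx => by
            have hbgt : a < b := hPgt b (by rw [hD]; simp [hb])
            have := hle x hx; omega)
      have h3 : pvG (as' ++ [a]) (bs.takeWhile p) = pvG as' (bs.takeWhile p) :=
        pvG_append_max _ as' a hSle
      rw [h1, h3, h2]
      have : min (as'.length + 1) (pvG as' (bs.takeWhile p) + (t.length + 1)) =
          min as'.length (pvG as' (bs.takeWhile p) + t.length) + 1 := by
        rw [show pvG as' (bs.takeWhile p) + (t.length + 1)
            = (pvG as' (bs.takeWhile p) + t.length) + 1 by ring, Nat.succ_min_succ]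
      rw [this]
      push_cast; ring

-- ===== VERDICT (by name: the statement is the Claim_ definition above) =====
theorem solution_spec : Claim_equal_solution := by
  intro A B _
  unfold Spec_solution solution solution_alt
  rw [sorted_rev_eq_reverse A, sorted_rev_eq_reverse B]
  rw [pvFold_eq (PySem.List.sorted A (fun x => x) false)
    (by simpa using PySem.List.sorted_pairwise A (fun x => x))
    (PySem.List.sorted B (fun x => x) false)
    (by simpa using PySem.List.sorted_pairwise B (fun x => x)) 0]
  have := pvMatch_foldl (PySem.List.sorted A (fun x => x) false)
    (PySem.List.sorted B (fun x => x) false) 0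
  simp at this ⊢
  rw [this]
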